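-- pv_equiv track=rewrite | github.com/coronarita/TIL-algorithm- | 프로그래머스/lv0/120837. 개미 군단/개미 군단.py | solution
-- ===== SOURCE A (Python) =====
-- def solution(hp):
--     answer = 0
--     army = [5, 3, 1]
--     for arm in army :
--         if hp >= arm :
--             answer += hp // arm
--             hp = hp % arm
--
--     return answer
-- ===== SOURCE B (Python) =====
-- # Residue-class lookup: the answer is hp//5 plus a precomputed optimal count
-- # for the remainder hp%5 -- no greedy pass over the coin list at all.
-- _EXTRA = (0, 1, 2, 1, 2)  # optimal ant count for hp in 0..4
--
-- def solution(hp):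
--     if hp <= 0:
--         return 0
--     return hp // 5 + _EXTRA[hp % 5]
-- ===== Notes on version B (the rewrite author's own statement) =====
-- stated objective: alternative
-- what changed: Replaced the greedy loop over the coin list with a precomputed lookup table giving the optimal ant count for each remainder class of the largest coin, added to the quotient by that coin; no iteration and no repeated division occur.
import Mathlib
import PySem

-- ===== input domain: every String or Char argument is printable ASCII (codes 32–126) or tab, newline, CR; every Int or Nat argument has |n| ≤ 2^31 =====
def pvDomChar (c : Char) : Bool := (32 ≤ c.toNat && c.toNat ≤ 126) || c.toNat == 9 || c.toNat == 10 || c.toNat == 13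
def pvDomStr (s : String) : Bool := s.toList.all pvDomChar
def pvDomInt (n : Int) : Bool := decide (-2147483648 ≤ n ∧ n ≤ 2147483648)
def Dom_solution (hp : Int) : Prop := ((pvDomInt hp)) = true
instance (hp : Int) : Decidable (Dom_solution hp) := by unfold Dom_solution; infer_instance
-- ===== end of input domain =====

-- ===== PORT A =====
-- A: greedy loop over army = [5,3,1]; transliterated as a foldl over the same list
def solution (hp : Int) : Int :=
  let army : List Int := [5, 3, 1]
  let res := army.foldl (fun (st : Int × Int) arm =>
    let (answer, hp) := st
    if hp ≥ arm then (answer + PySem.Int.floordiv hp arm, PySem.Int.mod hp arm)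
    else (answer, hp)) (0, hp)
  res.1

-- ===== PORT B =====
-- B: residue-class lookup table mod 5 added to hp//5; no greedy pass.
-- (hp % 5 is always in range of the 5-element table, so the table index never raises;
-- pyGet? … getD 0 is exact here.)
def solution_alt (hp : Int) : Int :=
  if hp ≤ 0 then 0
  else PySem.Int.floordiv hp 5 +
    (PySem.List.pyGet? ([0, 1, 2, 1, 2] : List Int) (PySem.Int.mod hp 5)).getD 0

-- ===== PRECONDITION & SPEC =====
def Spec_solution (hp : Int) (out : Int) : Prop := out = solution_alt hp
instance (hp : Int) (out : Int) : Decidable (Spec_solution hp out) := by unfold Spec_solution; infer_instance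

-- ===== CLAIM (what is proved, stated in full; the proofs are below) =====
def Claim_equal_solution : Prop := ∀ (hp : Int), Dom_solution hp → Spec_solution hp (solution hp)

-- ===== LEMMAS AND PROOFS =====

-- ===== VERDICT (by name: the statement is the Claim_ definition above) =====
-- table lookup characterised arithmetically (hp % 5 is always in 0..4)
theorem pvTable_solution (hp : Int) :
    (PySem.List.pyGet? ([0, 1, 2, 1, 2] : List Int) (hp % 5)).getD 0
      = hp % 5 - 2 * ((hp % 5) / 3) := by
  have h5 : hp % 5 = 0 ∨ hp % 5 = 1 ∨ hp % 5 = 2 ∨ hp % 5 = 3 ∨ hp % 5 = 4 := by omega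
  rcases h5 with h | h | h | h | h <;> rw [h] <;> decide

theorem solution_spec : Claim_equal_solution := by
  intro hp _
  unfold Spec_solution solution solution_alt
  simp only [List.foldl,
    PySem.Int.floordiv_eq_ediv_of_pos (show (0:Int) < 5 by norm_num),
    PySem.Int.mod_eq_emod_of_pos (show (0:Int) < 5 by norm_num),
    PySem.Int.floordiv_eq_ediv_of_pos (show (0:Int) < 3 by norm_num),
    PySem.Int.mod_eq_emod_of_pos (show (0:Int) < 3 by norm_num),
    PySem.Int.floordiv_eq_ediv_of_pos (show (0:Int) < 1 by norm_num),
    PySem.Int.mod_eq_emod_of_pos (show (0:Int) < 1 by norm_num),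
    pvTable_solution]
  split_ifs <;> omega
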